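-- pv_equiv track=rewrite | github.com/bauwenst/TkTkT | src/tktkt/util/printing.py | gridify
-- ===== SOURCE A (Python) =====
-- from typing import Iterable, List
--
-- def gridify(matrix: Iterable[Iterable]) -> str:
--     # Render elements and get column widths
--     reprs = []
--     column_widths = []
--     for row in matrix:
--         reprs.append([])
--         for i,e in enumerate(row):
--             r = str(e)
--             reprs[-1].append(r)
--             if i >= len(column_widths):
--                 column_widths.append(0)
--             column_widths[i] = max(column_widths[i], len(r))
--
--     # Format
--     result = ""
--     for row in reprs:
--         result += "["
--         L = len(row)
--         for i, (repr, width) in enumerate(zip(row, column_widths)):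
--             result += repr + (", ")*(i != L-1) + " "*(width-len(repr))
--         result += "],\n"
--     return result[:-2]
-- ===== SOURCE B (Python) =====
-- def gridify(matrix):
--     # Column-major construction: first render all cells, then build every output
--     # line simultaneously, one COLUMN at a time (outer loop over columns, inner
--     # comprehension over rows), instead of A's row-major formatting pass.
--     reprs = [[str(e) for e in row] for row in matrix]
--     lines = ["[" for _ in reprs]
--     ncols = max(map(len, reprs), default=0)
--     for j in range(ncols):
--         w = max(len(r[j]) for r in reprs if j < len(r))
--         lines = [line + (r[j] + ", " * (j != len(r) - 1) + " " * (w - len(r[j])) if j < len(r) else "")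
--                  for line, r in zip(lines, reprs)]
--     return ",\n".join(line + "]" for line in lines)
-- ===== Notes on version B (the rewrite author's own statement) =====
-- stated objective: alternative
-- what changed: B builds the output COLUMN-MAJOR: after rendering the cells it grows all output lines simultaneously, one column per outer step (computing that column's width and appending that column's padded cell to every line), then joins the lines; A is row-major throughout, accumulating widths while reading rows and then formatting row by row into one big string trimmed of its trailing ',\n'.
import Mathlib
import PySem

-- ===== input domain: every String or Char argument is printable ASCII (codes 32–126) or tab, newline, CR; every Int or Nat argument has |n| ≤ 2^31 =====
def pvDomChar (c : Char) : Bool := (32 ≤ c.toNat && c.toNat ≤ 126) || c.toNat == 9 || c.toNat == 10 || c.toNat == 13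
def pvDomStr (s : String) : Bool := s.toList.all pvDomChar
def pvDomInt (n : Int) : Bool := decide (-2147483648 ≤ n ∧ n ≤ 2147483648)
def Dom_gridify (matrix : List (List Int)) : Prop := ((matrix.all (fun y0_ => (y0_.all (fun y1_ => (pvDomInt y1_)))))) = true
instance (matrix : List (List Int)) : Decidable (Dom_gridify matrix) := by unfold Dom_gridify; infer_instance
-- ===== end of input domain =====

-- B builds the grid COLUMN-MAJOR: it renders all cells, then grows every output line at
-- once, one column per outer step, instead of A's row-major width accumulation and
-- row-by-row formatting pass (objective: alternative, same cost).
-- Python strings are represented as List Char (PySem.Chars); the result is wrapped with String.ofList.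

-- ===== PORT A =====
-- inner loop body: r = str(e); reprs[-1].append(r); extend widths if needed; widths[i] = max(widths[i], len(r))
def gridifyInnerA (st : List (List Char) × List Int) (ie : Int × Int) : List (List Char) × List Int :=
  let r := PySem.Int.toChars ie.2
  let reprRow := st.1 ++ [r]
  let ws := if ie.1 ≥ (st.2.length : Int) then st.2 ++ [0] else st.2
  (reprRow, PySem.List.pySetD ws ie.1 (max (PySem.List.pyGetD ws ie.1 0) (PySem.Chars.len r)))

-- outer loop body: reprs.append([]) then the enumerate loop over the row
def gridifyRowA (st : List (List (List Char)) × List Int) (row : List Int) :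
    List (List (List Char)) × List Int :=
  let p := (PySem.List.enumerate row).foldl gridifyInnerA ([], st.2)
  (st.1 ++ [p.1], p.2)

-- formatting loop body; '(", ")*(i != L-1)' is the string repeated a bool number of times (exact),
-- '" "*(width-len(repr))' is PySem.List.pyRepeat (empty for a non-positive count, as in Python)
def gridifyFmtRowA (widths : List Int) (acc : List Char) (row : List (List Char)) : List Char :=
  let acc1 := acc ++ ['[']
  let L : Int := (row.length : Int)
  let acc2 := (PySem.List.enumerate (row.zip widths)).foldl
    (fun a p => a ++ p.2.1 ++ (if p.1 ≠ L - 1 then [',', ' '] else [])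
        ++ PySem.List.pyRepeat [' '] (p.2.2 - PySem.Chars.len p.2.1)) acc1
  acc2 ++ [']', ',', '\n']

def gridify (matrix : List (List Int)) : String :=
  let st := matrix.foldl gridifyRowA ([], [])
  let res := st.1.foldl (gridifyFmtRowA st.2) []
  String.ofList (PySem.List.slice res none (some (-2)))   -- result[:-2]

-- ===== PORT B =====
-- w = max(len(r[j]) for r in reprs if j < len(r)); for 0 ≤ j < ncols the filtered list is
-- nonempty (some row has the maximal length), so the default 0 of maxD is never used
def bWidth (reprs : List (List (List Char))) (j : Int) : Int :=
  PySem.List.maxD ((reprs.filter (fun r => decide (j < (r.length : Int)))).map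
      (fun r => PySem.Chars.len (PySem.List.pyGetD r j []))) id 0

-- one column step: lines = [line + (r[j] + ", "*(j != len(r)-1) + " "*(w-len(r[j])) if j < len(r) else "")
--                           for line, r in zip(lines, reprs)]
def bColStep (reprs : List (List (List Char))) (lines : List (List Char)) (j : Int) :
    List (List Char) :=
  let w := bWidth reprs j
  (lines.zip reprs).map (fun p =>
    p.1 ++ (if j < (p.2.length : Int) then
        PySem.List.pyGetD p.2 j [] ++ (if j ≠ (p.2.length : Int) - 1 then [',', ' '] else [])
          ++ PySem.List.pyRepeat [' '] (w - PySem.Chars.len (PySem.List.pyGetD p.2 j []))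
      else []))

def gridify_alt (matrix : List (List Int)) : String :=
  let reprs := matrix.map (fun row => row.map PySem.Int.toChars)
  let lines0 := reprs.map (fun _ => ['['])
  let ncols := PySem.List.maxD (reprs.map (fun r => (r.length : Int))) id 0
  let lines := (PySem.List.pyRange 0 ncols).foldl (bColStep reprs) lines0
  String.ofList (PySem.Chars.join [',', '\n'] (lines.map (fun l => l ++ [']'])))

-- ===== PRECONDITION & SPEC =====
def Spec_gridify (matrix : List (List Int)) (out : String) : Prop := out = gridify_alt matrix
instance (matrix : List (List Int)) (out : String) : Decidable (Spec_gridify matrix out) := by unfold Spec_gridify; infer_instance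

-- ===== CLAIM (what is proved, stated in full; the proofs are below) =====
def Claim_equal_gridify : Prop := ∀ (matrix : List (List Int)), Dom_gridify matrix → Spec_gridify matrix (gridify matrix)

-- ===== LEMMAS AND PROOFS =====

-- canonical form both ports are reduced to: one line per row, cell j padded to bWidth j
def cellC (reprs : List (List (List Char))) (r : List (List Char)) (j : Nat) : List Char :=
  r.getD j [] ++ (if (j : Int) ≠ (r.length : Int) - 1 then [',', ' '] else [])
    ++ PySem.List.pyRepeat [' '] (bWidth reprs (j : Int) - PySem.Chars.len (r.getD j []))

def canonLine (reprs : List (List (List Char))) (r : List (List Char)) : List Char :=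
  ['['] ++ (List.range r.length).flatMap (cellC reprs r) ++ [']']

-- A's per-row line, as produced by its formatting loop
def altLine (widths : List Int) (row : List (List Char)) : List Char :=
  let last : Int := (row.length : Int) - 1
  let body := PySem.Chars.join []
    ((PySem.List.enumerate (row.zip widths)).map (fun p =>
      p.2.1 ++ (if p.1 ≠ last then [',', ' '] else [])
        ++ PySem.List.pyRepeat [' '] (p.2.2 - PySem.Chars.len p.2.1)))
  ['['] ++ body ++ [']']

def altWidths (reprs : List (List (List Char))) : List Int :=
  (PySem.List.pyRange 0 (PySem.List.maxD (reprs.map (fun r => (r.length : Int))) id 0)).map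
    (bWidth reprs)

-- pointwise max of two width lists, extending with `max 0` beyond the first list
def combine : List Int → List Int → List Int
  | ws, [] => ws
  | w :: ws, l :: ls => max w l :: combine ws ls
  | [], l :: ls => max 0 l :: combine [] ls

-- the rendered lengths of one row
def lenRow (row : List Int) : List Int := row.map (fun e => PySem.Chars.len (PySem.Int.toChars e))

-- the column-j entries of rows that reach column j
def colLens (j : Nat) (lss : List (List Int)) : List Int :=
  (lss.filter (fun ls => decide (j < ls.length))).map (fun ls => ls.getD j 0)

lemma innerA_eq (row : List Int) (rs : List (List Char)) (front ws : List Int) :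
    (PySem.List.enumerate row (front.length : Int)).foldl gridifyInnerA (rs, front ++ ws)
      = (rs ++ row.map PySem.Int.toChars, front ++ combine ws (lenRow row)) := by
  induction row generalizing rs front ws with
  | nil => simp [PySem.List.enumerate_nil, combine, lenRow]
  | cons e row ih =>
    rw [PySem.List.enumerate_cons, List.foldl_cons]
    cases ws with
    | nil =>
      have hstep : gridifyInnerA (rs, front ++ []) ((front.length : Int), e)
          = (rs ++ [PySem.Int.toChars e],
             (front ++ [max 0 (PySem.Chars.len (PySem.Int.toChars e))]) ++ []) := by
        unfold gridifyInnerA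
        simp only [List.append_nil]
        rw [if_pos (by exact_mod_cast le_refl _)]
        have h1 : PySem.List.pyGetD (front ++ [0]) (front.length : Int) 0 = (0:Int) := by
          rw [PySem.List.pyGetD_natCast]
          simp [List.getD_eq_getElem?_getD]
        have h2 : PySem.List.pySetD (front ++ [(0:Int)]) (front.length : Int)
              (max 0 (PySem.Chars.len (PySem.Int.toChars e)))
            = front ++ [max 0 (PySem.Chars.len (PySem.Int.toChars e))] := by
          rw [PySem.List.pySetD_natCast]
          rw [List.set_append_right _ _ (le_refl _)]
          simp
        simp only [h1, h2]
      rw [hstep]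
      have hlen : ((front.length : Int) + 1)
          = (((front ++ [max 0 (PySem.Chars.len (PySem.Int.toChars e))]).length : Int)) := by
        simp
      rw [hlen, ih]
      simp [combine, lenRow]
    | cons w ws =>
      have hstep : gridifyInnerA (rs, front ++ (w :: ws)) ((front.length : Int), e)
          = (rs ++ [PySem.Int.toChars e],
             (front ++ [max w (PySem.Chars.len (PySem.Int.toChars e))]) ++ ws) := by
        unfold gridifyInnerA
        rw [if_neg (by simp)]
        have h1 : PySem.List.pyGetD (front ++ (w :: ws)) (front.length : Int) 0 = w := by
          rw [PySem.List.pyGetD_natCast]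
          simp [List.getD_eq_getElem?_getD]
        have h2 : PySem.List.pySetD (front ++ (w :: ws)) (front.length : Int)
              (max w (PySem.Chars.len (PySem.Int.toChars e)))
            = (front ++ [max w (PySem.Chars.len (PySem.Int.toChars e))]) ++ ws := by
          rw [PySem.List.pySetD_natCast]
          rw [List.set_append_right _ _ (le_refl _)]
          simp
        simp only [h1, h2]
      rw [hstep]
      have hlen : ((front.length : Int) + 1)
          = (((front ++ [max w (PySem.Chars.len (PySem.Int.toChars e))]).length : Int)) := by
        simp
      rw [hlen, ih]
      simp [combine, lenRow]

lemma rowPhaseA_eq (matrix : List (List Int)) (rs : List (List (List Char))) (ws : List Int) :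
    matrix.foldl gridifyRowA (rs, ws)
      = (rs ++ matrix.map (fun row => row.map PySem.Int.toChars),
         matrix.foldl (fun w row => combine w (lenRow row)) ws) := by
  induction matrix generalizing rs ws with
  | nil => simp
  | cons row rest ih =>
    simp only [List.foldl_cons]
    have h0 : gridifyRowA (rs, ws) row
        = (rs ++ [row.map PySem.Int.toChars], combine ws (lenRow row)) := by
      unfold gridifyRowA
      have := innerA_eq row [] [] ws
      simp only [List.length_nil, Nat.cast_zero, List.nil_append] at this
      rw [this]
    rw [h0, ih]
    simp

lemma combine_length (ws ls : List Int) : (combine ws ls).length = max ws.length ls.length := by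
  induction ls generalizing ws with
  | nil => simp [combine]
  | cons l ls ih =>
    cases ws with
    | nil => simp [combine, ih]
    | cons w ws => simp [combine, ih]

lemma combine_getD (ls ws : List Int) (j : Nat) :
    (combine ws ls).getD j 0
      = if j < ls.length then max (ws.getD j 0) (ls.getD j 0) else ws.getD j 0 := by
  induction ls generalizing ws j with
  | nil => simp [combine]
  | cons l ls ih =>
    cases ws with
    | nil =>
      cases j with
      | zero => simp [combine]
      | succ j => simpa [combine] using ih [] j
    | cons w ws =>
      cases j with
      | zero => simp [combine]
      | succ j => simpa [combine, Nat.succ_lt_succ_iff] using ih ws j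

lemma getD_range_map (ws : List Int) :
    (List.range ws.length).map (fun j => ws.getD j 0) = ws := by
  apply List.ext_getElem
  · simp
  · intro i h1 h2
    simp [List.getD_eq_getElem?_getD, List.getElem?_eq_getElem h2]

lemma foldl_combine_eq (lss : List (List Int)) (ws : List Int) :
    lss.foldl (fun w ls => combine w ls) ws
      = (List.range (lss.foldl (fun m ls => max m ls.length) ws.length)).map
          (fun j => (colLens j lss).foldl max (ws.getD j 0)) := by
  induction lss generalizing ws with
  | nil => simpa [colLens] using (getD_range_map ws).symm
  | cons ls rest ih =>
    simp only [List.foldl_cons]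
    rw [ih (combine ws ls)]
    rw [combine_length]
    apply List.map_congr_left
    intro j _
    rw [combine_getD]
    unfold colLens
    by_cases h : j < ls.length
    · simp [h]
    · simp [h]

lemma max?_cons_eq (x : Int) (xs : List Int) :
    PySem.List.max? (x :: xs) id = some (xs.foldl max x) := by
  unfold PySem.List.max?
  simp only [List.foldl_cons, id_eq]
  induction xs generalizing x with
  | nil => rfl
  | cons y l ih =>
    simp only [List.foldl_cons]
    by_cases h : x < y
    · simpa [h, max_eq_right h.le] using ih y
    · simpa [h, max_eq_left (not_lt.mp h)] using ih x

lemma maxD_eq_foldl (xs : List Int) (h : ∀ x ∈ xs, 0 ≤ x) :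
    PySem.List.maxD xs id 0 = xs.foldl max 0 := by
  cases xs with
  | nil => rfl
  | cons x xs =>
    unfold PySem.List.maxD
    rw [max?_cons_eq]
    simp only [Option.getD_some, List.foldl_cons]
    rw [max_eq_right (h x (by simp))]

lemma foldl_max_cast (reprs : List (List (List Char))) (b : Nat) :
    (reprs.map (fun r => (r.length : Int))).foldl max (b : Int)
      = ((reprs.foldl (fun m r => max m r.length) b : Nat) : Int) := by
  induction reprs generalizing b with
  | nil => simp
  | cons r rest ih =>
    simp only [List.map_cons, List.foldl_cons]
    rw [show max (b:Int) (r.length : Int) = ((max b r.length : Nat) : Int) by push_cast; rfl, ih]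

-- A's accumulated widths = the column-wise widths
lemma widths_eq (matrix : List (List Int)) :
    (matrix.map lenRow).foldl (fun w ls => combine w ls) []
      = altWidths (matrix.map (fun row => row.map PySem.Int.toChars)) := by
  set reprs := matrix.map (fun row => row.map PySem.Int.toChars) with hreprs
  have hlenss : matrix.map lenRow = reprs.map (fun r => r.map PySem.Chars.len) := by
    rw [hreprs, List.map_map]; simp [lenRow, Function.comp]
  set N : Nat := reprs.foldl (fun m r => max m r.length) 0 with hN
  have hncols : PySem.List.maxD (reprs.map (fun r => (r.length : Int))) id 0 = (N : Int) := by
    rw [maxD_eq_foldl _ (by intro x hx; simp at hx; obtain ⟨r, _, rfl⟩ := hx; positivity)]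
    exact_mod_cast foldl_max_cast reprs 0
  have hNlen : (matrix.map lenRow).foldl (fun m ls => max m ls.length) 0 = N := by
    rw [hlenss, List.foldl_map]; simp only [List.length_map]; exact hN.symm
  rw [foldl_combine_eq]
  simp only [altWidths]
  rw [hncols, PySem.List.pyRange_zero_natCast, List.map_map]
  simp only [List.length_nil, hNlen]
  apply List.map_congr_left
  intro k hk
  simp only [Function.comp, bWidth]
  have hfilter : (reprs.filter (fun r => decide ((k:Int) < (r.length : Int))))
      = reprs.filter (fun r => decide (k < r.length)) := by
    apply List.filter_congr; intro r _; simp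
  have hcol : colLens k (matrix.map lenRow)
      = (reprs.filter (fun r => decide (k < r.length))).map
          (fun r => PySem.Chars.len (PySem.List.pyGetD r (k : Int) [])) := by
    unfold colLens
    rw [hlenss, List.filter_map, List.map_map]
    rw [List.filter_congr (l := reprs) (q := fun r => decide (k < r.length))
        (by intro r _; simp [Function.comp])]
    apply List.map_congr_left
    intro r hr
    have hk2 : k < r.length := by simpa using (List.mem_filter.mp hr).2
    simp only [Function.comp, PySem.List.pyGetD_natCast, List.getD_eq_getElem _ _ hk2]
    rw [List.getD_eq_getElem _ _ (by simpa using hk2), List.getElem_map]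
  rw [maxD_eq_foldl _ (by
    intro x hx
    simp only [List.mem_map] at hx
    obtain ⟨r, _, rfl⟩ := hx
    simp [PySem.Chars.len_eq])]
  rw [hfilter, ← hcol]
  simp

lemma join_nil_flatten (ps : List (List Char)) : PySem.Chars.join [] ps = ps.flatten := by
  simp only [PySem.Chars.join, List.intercalate]
  induction ps with
  | nil => rfl
  | cons p ps ih =>
    cases ps with
    | nil => simp
    | cons q ps => simpa [List.intersperse] using ih

lemma fmtRowA_chunk (W : List Int) (acc : List Char) (row : List (List Char)) :
    gridifyFmtRowA W acc row = acc ++ (altLine W row ++ [',', '\n']) := by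
  simp only [gridifyFmtRowA, altLine, join_nil_flatten, List.flatten_eq_flatMap, ne_eq]
  rw [show (fun (a : List Char) (p : Int × (List Char × Int)) =>
        a ++ p.2.1 ++ (if p.1 ≠ (row.length : Int) - 1 then [',', ' '] else [])
          ++ PySem.List.pyRepeat [' '] (p.2.2 - PySem.Chars.len p.2.1))
      = (fun a p => a ++ (p.2.1 ++ ((if p.1 ≠ (row.length : Int) - 1 then [',', ' '] else [])
          ++ PySem.List.pyRepeat [' '] (p.2.2 - PySem.Chars.len p.2.1)))) from by
        funext a p; simp [List.append_assoc]]
  rw [PySem.List.foldl_append_eq_flatMap]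
  simp [List.flatMap_map, List.append_assoc]

lemma trim_join (l : List (List (List Char))) (h : List (List Char) → List Char) :
    ((l.flatMap (fun r => h r ++ [',', '\n'])).take
        ((l.flatMap (fun r => h r ++ [',', '\n'])).length - 2))
      = PySem.Chars.join [',', '\n'] (l.map h) := by
  induction l with
  | nil => simp [PySem.Chars.join_nil]
  | cons r rest ih =>
    cases rest with
    | nil => simp [PySem.Chars.join_singleton]
    | cons r2 rest2 =>
      have htail : 2 ≤ ((r2 :: rest2).flatMap (fun r => h r ++ [',', '\n'])).length := by
        simp [List.flatMap_cons]
        omega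
      rw [List.flatMap_cons, List.map_cons, List.map_cons, PySem.Chars.join_cons_cons]
      rw [List.length_append, List.take_append]
      have harith : (h r ++ [',', '\n']).length
            + ((r2 :: rest2).flatMap (fun r => h r ++ [',', '\n'])).length - 2
            - (h r ++ [',', '\n']).length
          = ((r2 :: rest2).flatMap (fun r => h r ++ [',', '\n'])).length - 2 := by
        omega
      rw [harith]
      rw [List.take_of_length_le (by omega)]
      rw [ih]
      simp [List.append_assoc, List.map_cons]

lemma fmt_eq (W : List Int) (reprs : List (List (List Char))) :
    PySem.List.slice (reprs.foldl (gridifyFmtRowA W) []) none (some (-2))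
      = PySem.Chars.join [',', '\n'] (reprs.map (altLine W)) := by
  have h1 : reprs.foldl (gridifyFmtRowA W) []
      = reprs.flatMap (fun r => altLine W r ++ [',', '\n']) := by
    rw [show gridifyFmtRowA W = (fun a r => a ++ (altLine W r ++ [',', '\n'])) from by
      funext a r; exact fmtRowA_chunk W a r]
    rw [PySem.List.foldl_append_eq_flatMap]
    rfl
  rw [h1, PySem.List.slice_to_neg_ofNat _ 2 (by omega)]
  exact trim_join reprs (altLine W)

-- ===== B-side lemmas: the column-major loop builds the same lines =====

lemma zip_map_self {α β : Type} (g : α → β) (l : List α) :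
    (l.map g).zip l = l.map (fun x => (g x, x)) := by
  induction l with
  | nil => rfl
  | cons x xs ih => simp [ih]

lemma bColStep_map (reprs : List (List (List Char))) (g : List (List Char) → List Char) (m : Nat) :
    bColStep reprs (reprs.map g) (m : Int)
      = reprs.map (fun r => g r ++ (if m < r.length then cellC reprs r m else [])) := by
  unfold bColStep
  rw [zip_map_self, List.map_map]
  apply List.map_congr_left
  intro r _
  simp only [Function.comp, cellC]
  by_cases h : m < r.length
  · rw [if_pos (by exact_mod_cast h), if_pos h]
    simp [PySem.List.pyGetD_natCast]
  · rw [if_neg (by exact_mod_cast h), if_neg h]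

lemma colLoop (reprs : List (List (List Char))) (m : Nat) :
    (PySem.List.pyRange 0 (m : Int)).foldl (bColStep reprs) (reprs.map (fun _ => ['[']))
      = reprs.map (fun r => ['['] ++ (List.range (min m r.length)).flatMap (cellC reprs r)) := by
  induction m with
  | zero =>
    rw [show ((0 : Nat) : Int) = 0 from rfl, PySem.List.pyRange_one_eq_nil le_rfl]
    simp
  | succ m ih =>
    rw [show (((m + 1 : Nat)) : Int) = (m : Int) + 1 from by push_cast; ring]
    rw [PySem.List.pyRange_one_succ_right (by positivity), List.foldl_append, ih]
    simp only [List.foldl_cons, List.foldl_nil]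
    rw [bColStep_map reprs
      (fun r => ['['] ++ (List.range (min m r.length)).flatMap (cellC reprs r)) m]
    apply List.map_congr_left
    intro r _
    by_cases h : m < r.length
    · have h1 : min (m + 1) r.length = min m r.length + 1 := by omega
      have h2 : min m r.length = m := by omega
      rw [if_pos h, h1, List.range_succ, List.flatMap_append, h2]
      simp
    · have h1 : min (m + 1) r.length = min m r.length := by omega
      rw [if_neg h, h1]
      simp

lemma le_foldl_max_base (l : List (List (List Char))) (b : Nat) :
    b ≤ l.foldl (fun m x => max m x.length) b := by
  induction l generalizing b with
  | nil => simp
  | cons x xs ih => exact le_trans (le_max_left b x.length) (ih _)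

lemma length_le_foldl_max (l : List (List (List Char))) (r : List (List Char)) (h : r ∈ l)
    (b : Nat) : r.length ≤ l.foldl (fun m x => max m x.length) b := by
  induction l generalizing b with
  | nil => cases h
  | cons x xs ih =>
    rcases List.mem_cons.mp h with h | h
    · subst h
      exact le_trans (le_max_right b r.length) (le_foldl_max_base xs _)
    · exact ih h _

-- the enumerate-over-zip loop as a flatMap over indices
lemma enumerate_zip_flatMap (F : Int × (List Char × Int) → List Char)
    (r : List (List Char)) :
    ∀ (ws : List Int) (k : Nat), r.length ≤ ws.length →
    (PySem.List.enumerate (r.zip ws) (k : Int)).flatMap F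
      = (List.range r.length).flatMap
          (fun i => F (((k + i : Nat) : Int), (r.getD i [], ws.getD i 0))) := by
  induction r with
  | nil => intro ws k _; simp [PySem.List.enumerate_nil]
  | cons a r ih =>
    intro ws k h
    cases ws with
    | nil => simp at h
    | cons w ws =>
      rw [List.zip_cons_cons, PySem.List.enumerate_cons, List.flatMap_cons,
          List.length_cons, List.range_succ_eq_map, List.flatMap_cons, List.flatMap_map]
      have hk : ((k : Int) + 1) = (((k + 1 : Nat)) : Int) := by push_cast; ring
      rw [hk, ih ws (k + 1) (by simpa using h)]
      congr 1
      apply List.flatMap_congr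
      intro i _
      simp only [List.getD_cons_succ]
      congr 2
      push_cast
      ring

lemma getD_range_map_bWidth (reprs : List (List (List Char))) (N i : Nat) (hi : i < N) :
    ((List.range N).map (fun j : Nat => bWidth reprs (j : Int))).getD i 0
      = bWidth reprs (i : Int) := by
  rw [List.getD_eq_getElem?_getD, List.getElem?_map, List.getElem?_range hi]
  rfl

lemma altLine_canon (reprs : List (List (List Char))) (r : List (List Char)) (N : Nat)
    (h : r.length ≤ N) :
    altLine ((List.range N).map (fun j : Nat => bWidth reprs (j : Int))) r
      = canonLine reprs r := by
  simp only [altLine, canonLine]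
  rw [join_nil_flatten, ← List.flatMap_def]
  rw [show (0 : Int) = ((0 : Nat) : Int) from rfl]
  rw [enumerate_zip_flatMap _ r _ 0 (by simpa using h)]
  congr 1
  congr 1
  apply List.flatMap_congr
  intro i hi
  have hiN : i < N := lt_of_lt_of_le (List.mem_range.mp hi) h
  rw [getD_range_map_bWidth reprs N i hiN]
  simp [cellC, List.getD_eq_getElem?_getD]

-- B's loop result equals the canonical lines
lemma alt_canon (matrix : List (List Int)) :
    gridify_alt matrix
      = String.ofList (PySem.Chars.join [',', '\n']
          ((matrix.map (fun row => row.map PySem.Int.toChars)).map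
            (canonLine (matrix.map (fun row => row.map PySem.Int.toChars))))) := by
  simp only [gridify_alt]
  set reprs := matrix.map (fun row => row.map PySem.Int.toChars) with hreprs
  set N : Nat := reprs.foldl (fun m r => max m r.length) 0 with hN
  have hncols : PySem.List.maxD (reprs.map (fun r => (r.length : Int))) id 0 = (N : Int) := by
    rw [maxD_eq_foldl _ (by intro x hx; simp at hx; obtain ⟨r, _, rfl⟩ := hx; positivity)]
    exact_mod_cast foldl_max_cast reprs 0
  rw [hncols, colLoop, List.map_map]
  congr 1
  congr 1
  apply List.map_congr_left
  intro r hr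
  have hle : r.length ≤ N := length_le_foldl_max reprs r hr 0
  have hmin : min N r.length = r.length := by omega
  simp only [Function.comp, hmin, canonLine]

-- A's widths list rewritten through the range-of-bWidth form
lemma altWidths_range (reprs : List (List (List Char))) :
    altWidths reprs
      = (List.range (reprs.foldl (fun m r => max m r.length) 0)).map
          (fun j : Nat => bWidth reprs (j : Int)) := by
  unfold altWidths
  have hncols : PySem.List.maxD (reprs.map (fun r => (r.length : Int))) id 0
      = ((reprs.foldl (fun m r => max m r.length) 0 : Nat) : Int) := by
    rw [maxD_eq_foldl _ (by intro x hx; simp at hx; obtain ⟨r, _, rfl⟩ := hx; positivity)]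
    exact_mod_cast foldl_max_cast reprs 0
  rw [hncols, PySem.List.pyRange_zero_natCast, List.map_map]
  simp [Function.comp]

-- ===== VERDICT (by name: the statement is the Claim_ definition above) =====
theorem gridify_spec : Claim_equal_gridify := by
  intro matrix _
  show _ = _
  rw [alt_canon]
  unfold gridify
  rw [rowPhaseA_eq]
  simp only [List.nil_append]
  set reprs := matrix.map (fun row => row.map PySem.Int.toChars) with hreprs
  have hW : (matrix.foldl (fun w row => combine w (lenRow row)) [])
      = altWidths reprs := by
    rw [← widths_eq, List.foldl_map]
  rw [hW, fmt_eq]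
  congr 1
  congr 1
  apply List.map_congr_left
  intro r hr
  rw [altWidths_range]
  exact altLine_canon reprs r _ (length_le_foldl_max reprs r hr 0)
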